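-- pv_equiv track=rewrite | github.com/ankitbhandiwad/pdffiller | webapp/pdf_forms.py | _slugify_field_name
-- ===== SOURCE A (Python) =====
-- def _slugify_field_name(label: str) -> str:
--     cleaned = []
--     for ch in label.strip().lower():
--         if ch.isalnum():
--             cleaned.append(ch)
--         elif ch in (" ", "-", "_"):
--             cleaned.append("_")
--     slug = "".join(cleaned).strip("_")
--     while "__" in slug:
--         slug = slug.replace("__", "_")
--     return slug or "manual"
-- ===== SOURCE B (Python) =====
-- def _slugify_field_name(label: str) -> str:
--     words = []
--     for tok in label.strip().lower().replace("-", " ").replace("_", " ").split(" "):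
--         word = "".join(c for c in tok if c.isalnum())
--         if word:
--             words.append(word)
--     return "_".join(words) or "manual"
-- ===== Notes on version B (the rewrite author's own statement) =====
-- stated objective: alternative
-- what changed: B tokenizes the label by splitting on the separator set and cleans/joins the nonempty tokens, instead of A's flat char-filter pass followed by an underscore-strip and a fixpoint while-loop collapsing double underscores.
import Mathlib
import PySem

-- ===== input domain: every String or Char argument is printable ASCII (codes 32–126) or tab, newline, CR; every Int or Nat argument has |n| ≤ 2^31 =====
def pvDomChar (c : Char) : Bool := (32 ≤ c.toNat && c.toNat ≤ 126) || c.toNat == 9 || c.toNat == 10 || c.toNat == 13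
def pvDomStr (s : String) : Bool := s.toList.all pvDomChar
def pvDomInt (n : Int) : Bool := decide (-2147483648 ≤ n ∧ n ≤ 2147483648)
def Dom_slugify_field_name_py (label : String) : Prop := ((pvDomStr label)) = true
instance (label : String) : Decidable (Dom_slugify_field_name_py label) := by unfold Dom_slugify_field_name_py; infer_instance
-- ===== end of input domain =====

-- B replaces A's char-filter pass plus underscore-strip and double-underscore collapse loop by
-- tokenize-on-separators / clean-each-token / join-nonempty-tokens (objective: alternative decomposition).

-- ===== PORT A =====
-- helpers needed by port A's while-loop termination ("while '__' in slug: slug = slug.replace('__','_')"):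
-- repDD is what one replace("__","_") pass computes (proved in replace_dd_eq), and it strictly
-- shortens the string whenever "__" occurs, which bounds the loop.
def repDD : List Char → List Char
  | [] => []
  | a :: t =>
    match t with
    | [] => [a]
    | b :: t' => if a = '_' ∧ b = '_' then '_' :: repDD t' else a :: repDD (b :: t')

theorem replace_go_dd : ∀ (fuel : Nat) (l acc : List Char), l.length ≤ fuel →
    PySem.Chars.replace.go ['_','_'] ['_'] fuel l acc = acc.reverse ++ repDD l := by
  intro fuel
  induction fuel with
  | zero => intro l acc h; have : l = [] := by cases l <;> simp_all
            subst this; simp [PySem.Chars.replace.go, repDD]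
  | succ n ih =>
    intro l acc h
    cases l with
    | nil => simp [PySem.Chars.replace.go, repDD]
    | cons c t =>
      rw [PySem.Chars.replace.go]
      cases t with
      | nil =>
        have hp : List.isPrefixOf ['_','_'] [c] = false := by simp [List.isPrefixOf]
        rw [hp]
        simp only [Bool.false_eq_true, if_false]
        rw [ih [] _ (by simp)]
        simp [repDD]
      | cons b t' =>
        by_cases hc : c = '_' ∧ b = '_'
        · obtain ⟨h1, h2⟩ := hc; subst h1; subst h2
          have hp : List.isPrefixOf ['_','_'] ('_'::'_'::t') = true := by
            simp [List.isPrefixOf]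
          rw [hp, if_pos rfl]
          simp only [List.length_cons, List.drop_succ_cons, List.drop_zero, List.length_nil,
            List.drop, List.reverse_cons, List.reverse_nil, List.nil_append]
          rw [ih t' _ (by simp at h ⊢; omega)]
          simp [repDD]
        · have hp : List.isPrefixOf ['_','_'] (c::b::t') = false := by
            simp [List.isPrefixOf]; tauto
          rw [hp]
          simp only [Bool.false_eq_true, if_false]
          rw [ih (b::t') _ (by simp at h ⊢; omega)]
          simp [repDD, hc]

theorem replace_dd_eq (v : List Char) :
    PySem.Chars.replace v ['_','_'] ['_'] = repDD v := by
  rw [PySem.Chars.replace]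
  simp only [List.isEmpty, Bool.false_eq_true, if_false]
  exact replace_go_dd v.length v [] le_rfl

theorem repDD_cons_cons (a b : Char) (t : List Char) :
    repDD (a::b::t) = if a = '_' ∧ b = '_' then '_' :: repDD t else a :: repDD (b::t) := rfl

theorem repDD_length_le (v : List Char) : (repDD v).length ≤ v.length := by
  fun_induction repDD v <;> simp_all <;> omega

theorem dd_infix_cons (c : Char) (t : List Char) :
    ['_','_'] <:+: (c :: t) ↔ (c = '_' ∧ t.head? = some '_') ∨ ['_','_'] <:+: t := by
  rw [List.infix_cons_iff]
  constructor
  · rintro (hp | hi)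
    · left
      rw [List.cons_prefix_cons] at hp
      obtain ⟨h1, h2⟩ := hp
      cases t with
      | nil => simp at h2
      | cons d t' => rw [List.cons_prefix_cons] at h2; exact ⟨h1.symm, by simp [h2.1.symm]⟩
    · right; exact hi
  · rintro (⟨h1, h2⟩ | hi)
    · left
      cases t with
      | nil => simp at h2
      | cons d t' =>
        simp at h2
        rw [List.cons_prefix_cons]
        exact ⟨h1.symm, by rw [List.cons_prefix_cons]; exact ⟨h2.symm, List.nil_prefix⟩⟩
    · right; exact hi

theorem repDD_length_lt (v : List Char) (h : ['_','_'] <:+: v) :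
    (repDD v).length < v.length := by
  fun_induction repDD v with
  | case1 => simp at h
  | case2 a => rw [dd_infix_cons] at h; simp at h
  | case3 a b t' hab ih =>
    simp only [repDD_cons_cons, if_pos hab, List.length_cons]
    have h2 := repDD_length_le t'
    omega
  | case4 a b t' hab ih =>
    rw [dd_infix_cons] at h
    rcases h with ⟨h1, h2⟩ | hi
    · simp at h2; exact absurd ⟨h1, h2⟩ hab
    · simp only [repDD_cons_cons, if_neg hab, List.length_cons]
      have h3 := ih hi
      simp only [List.length_cons] at h3
      omega

theorem replace_dd_length_lt (s : List Char) (h : PySem.Chars.isIn ['_','_'] s = true) :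
    (PySem.Chars.replace s ['_','_'] ['_']).length < s.length := by
  rw [replace_dd_eq]
  exact repDD_length_lt s ((PySem.Chars.isIn_iff_infix _ _).mp h)

def whileCollapse (slug : List Char) : List Char :=
  if h : PySem.Chars.isIn ['_','_'] slug = true then
    whileCollapse (PySem.Chars.replace slug ['_','_'] ['_'])
  else slug
termination_by slug.length
decreasing_by exact replace_dd_length_lt slug h

def slugify_field_name_py (label : String) : String :=
  let cleaned := (PySem.Chars.lower (PySem.Chars.strip label.toList)).foldl
      (fun acc ch =>
        if PySem.Chars.isalnum ch then acc ++ [ch]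
        else if ch = ' ' ∨ ch = '-' ∨ ch = '_' then acc ++ ['_'] else acc) ([] : List Char)
  let slug := whileCollapse (PySem.Chars.stripChars cleaned ['_'])
  if slug = [] then "manual" else String.mk slug

-- ===== PORT B =====
def slugify_field_name_py_alt (label : String) : String :=
  let toks := PySem.Chars.splitOn
      (PySem.Chars.replace
        (PySem.Chars.replace (PySem.Chars.lower (PySem.Chars.strip label.toList)) ['-'] [' '])
        ['_'] [' ']) [' ']
  let words := (toks.map (fun tok => tok.filter PySem.Chars.isalnum)).filter (· ≠ [])
  let res := PySem.Chars.join ['_'] words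
  if res = [] then "manual" else String.mk res

-- ===== PRECONDITION & SPEC =====
def Spec_slugify_field_name_py (label : String) (out : String) : Prop := out = slugify_field_name_py_alt label
instance (label : String) (out : String) : Decidable (Spec_slugify_field_name_py label out) := by unfold Spec_slugify_field_name_py; infer_instance

-- ===== CLAIM (what is proved, stated in full; the proofs are below) =====
def Claim_equal_slugify_field_name_py : Prop := ∀ (label : String), Dom_slugify_field_name_py label → Spec_slugify_field_name_py label (slugify_field_name_py label)

-- ===== LEMMAS AND PROOFS =====
theorem repDD_ne_nil (v : List Char) (h : v ≠ []) : repDD v ≠ [] := by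
  fun_induction repDD v <;> simp_all

theorem replace_go_single (x y : Char) : ∀ (fuel : Nat) (l acc : List Char), l.length ≤ fuel →
    PySem.Chars.replace.go [x] [y] fuel l acc
      = acc.reverse ++ l.map (fun c => if c = x then y else c) := by
  intro fuel
  induction fuel with
  | zero => intro l acc h; have : l = [] := by cases l <;> simp_all
            subst this; simp [PySem.Chars.replace.go]
  | succ n ih =>
    intro l acc h
    cases l with
    | nil => simp [PySem.Chars.replace.go]
    | cons c t =>
      rw [PySem.Chars.replace.go]
      by_cases hc : c = x
      · have hp : List.isPrefixOf [x] (c::t) = true := by simp [List.isPrefixOf, hc]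
        rw [hp, if_pos rfl]
        simp only [List.length_cons, List.drop_succ_cons, List.length_nil, List.drop,
          List.reverse_cons, List.reverse_nil, List.nil_append]
        rw [ih t _ (by simp at h ⊢; omega)]
        simp [hc]
      · have hp : List.isPrefixOf [x] (c::t) = false := by simp [List.isPrefixOf]; exact fun a => absurd a.symm hc
        rw [hp]
        simp only [Bool.false_eq_true, if_false]
        rw [ih t _ (by simp at h ⊢; omega)]
        simp [hc]

theorem replace_single_eq (v : List Char) (x y : Char) :
    PySem.Chars.replace v [x] [y] = v.map (fun c => if c = x then y else c) := by
  rw [PySem.Chars.replace]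
  simp only [List.isEmpty, Bool.false_eq_true, if_false]
  exact replace_go_single x y v.length v [] le_rfl

def splitC (x : Char) : List Char → List Char × List (List Char)
  | [] => ([], [])
  | c :: t => if c = x then ([], (splitC x t).1 :: (splitC x t).2)
              else (c :: (splitC x t).1, (splitC x t).2)

theorem splitOn_go_single (x : Char) : ∀ (fuel : Nat) (l cur : List Char) (acc : List (List Char)),
    l.length ≤ fuel →
    PySem.Chars.splitOn.go [x] fuel l cur acc
      = acc.reverse ++ (cur.reverse ++ (splitC x l).1) :: (splitC x l).2 := by
  intro fuel
  induction fuel with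
  | zero => intro l cur acc h; have : l = [] := by cases l <;> simp_all
            subst this; simp [PySem.Chars.splitOn.go, splitC]
  | succ n ih =>
    intro l cur acc h
    cases l with
    | nil => simp [PySem.Chars.splitOn.go, splitC]
    | cons c t =>
      rw [PySem.Chars.splitOn.go]
      by_cases hc : c = x
      · have hp : List.isPrefixOf [x] (c::t) = true := by simp [List.isPrefixOf, hc]
        rw [hp, if_pos rfl]
        simp only [List.length_cons, List.drop_succ_cons, List.length_nil, List.drop]
        rw [ih t _ _ (by simp at h ⊢; omega)]
        simp [splitC, hc]
      · have hp : List.isPrefixOf [x] (c::t) = false := by simp [List.isPrefixOf]; exact fun a => absurd a.symm hc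
        rw [hp]
        simp only [Bool.false_eq_true, if_false]
        rw [ih t _ _ (by simp at h ⊢; omega)]
        simp [splitC, hc]

theorem splitOn_single_eq (v : List Char) (x : Char) :
    PySem.Chars.splitOn v [x] = (splitC x v).1 :: (splitC x v).2 := by
  rw [PySem.Chars.splitOn]
  rw [splitOn_go_single x (v.length+1) v [] [] (by omega)]
  simp

def fCl (c : Char) : Option Char :=
  if PySem.Chars.isalnum c then some c
  else if c = ' ' ∨ c = '-' ∨ c = '_' then some '_' else none

def gSep (c : Char) : Char :=
  if (if c = '-' then ' ' else c) = '_' then ' ' else (if c = '-' then ' ' else c)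

def filterNE (l : List (List Char)) : List (List Char) := l.filter (· ≠ [])

def piecesL (v : List Char) : List (List Char) := (splitC '_' v).1 :: (splitC '_' v).2

theorem filterNE_cons (a : List Char) (l : List (List Char)) :
    filterNE (a :: l) = if a = [] then filterNE l else a :: filterNE l := by
  simp only [filterNE, List.filter_cons]
  split_ifs <;> simp_all

theorem splitC_cons (x c : Char) (t : List Char) :
    splitC x (c :: t) = if c = x then ([], (splitC x t).1 :: (splitC x t).2)
                        else (c :: (splitC x t).1, (splitC x t).2) := rfl

theorem foldl_cleaned (cs : List Char) : ∀ acc : List Char,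
    cs.foldl (fun acc ch =>
        if PySem.Chars.isalnum ch then acc ++ [ch]
        else if ch = ' ' ∨ ch = '-' ∨ ch = '_' then acc ++ ['_'] else acc) acc
      = acc ++ cs.filterMap fCl := by
  induction cs with
  | nil => simp
  | cons c t ih =>
    intro acc
    simp only [List.foldl_cons, List.filterMap_cons]
    by_cases hA : PySem.Chars.isalnum c = true
    · rw [if_pos hA, show fCl c = some c from by simp [fCl, hA], ih]; simp
    · by_cases hS : c = ' ' ∨ c = '-' ∨ c = '_'
      · rw [if_neg hA, if_pos hS, show fCl c = some '_' from by simp [fCl, hA, hS], ih]; simp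
      · rw [if_neg hA, if_neg hS, show fCl c = none from by simp [fCl, hA, hS], ih]

theorem pw (cs : List Char) :
    (splitC '_' (cs.filterMap fCl)).1 = ((splitC ' ' (cs.map gSep)).1).filter PySem.Chars.isalnum
    ∧ (splitC '_' (cs.filterMap fCl)).2
        = ((splitC ' ' (cs.map gSep)).2).map (fun p => p.filter PySem.Chars.isalnum) := by
  induction cs with
  | nil => simp [splitC]
  | cons c t ih =>
    obtain ⟨ih1, ih2⟩ := ih
    by_cases hA : PySem.Chars.isalnum c = true
    · have hu : c ≠ '_' := by rintro rfl; simp [PySem.Chars.isalnum, PySem.Chars.isalpha,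
        PySem.Chars.isdigit, PySem.Chars.isupper, PySem.Chars.islower] at hA
      have hsp : c ≠ ' ' := by rintro rfl; simp [PySem.Chars.isalnum, PySem.Chars.isalpha,
        PySem.Chars.isdigit, PySem.Chars.isupper, PySem.Chars.islower] at hA
      have hmi : c ≠ '-' := by rintro rfl; simp [PySem.Chars.isalnum, PySem.Chars.isalpha,
        PySem.Chars.isdigit, PySem.Chars.isupper, PySem.Chars.islower] at hA
      have hg : gSep c = c := by simp [gSep, hmi, hu]
      have hf : fCl c = some c := by simp [fCl, hA]
      simp only [List.filterMap_cons, hf, List.map_cons, hg, splitC_cons,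
        if_neg hu, if_neg hsp]
      refine ⟨?_, ih2⟩
      simp [List.filter_cons, hA, ih1]
    · by_cases hS : c = ' ' ∨ c = '-' ∨ c = '_'
      · have hg : gSep c = ' ' := by
          rcases hS with rfl | rfl | rfl <;> simp [gSep]
        have hf : fCl c = some '_' := by simp [fCl, hA, hS]
        simp only [List.filterMap_cons, hf, List.map_cons, hg, splitC_cons, if_pos rfl]
        refine ⟨by simp, ?_⟩
        simp [ih1, ih2]
      · push_neg at hS
        obtain ⟨hsp, hmi, hu⟩ := hS
        have hg : gSep c = c := by simp [gSep, hmi, hu]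
        have hf : fCl c = none := by simp [fCl, hA, hsp, hmi, hu]
        simp only [List.filterMap_cons, hf, List.map_cons, hg, splitC_cons, if_neg hsp]
        refine ⟨?_, ih2⟩
        simp [List.filter_cons, hA, ih1]

def noDD : List Char → Bool
  | [] => true
  | [_] => true
  | a :: b :: t => !(a == '_' && b == '_') && noDD (b :: t)

theorem dd_infix_iff (v : List Char) : ['_','_'] <:+: v ↔ noDD v = false := by
  fun_induction noDD v with
  | case1 => simp
  | case2 a => rw [dd_infix_cons]; simp
  | case3 a b t ih =>
    rw [dd_infix_cons]
    simp only [noDD, Bool.and_eq_false_iff, Bool.not_eq_false', List.head?_cons]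
    rw [ih]
    constructor
    · rintro (⟨rfl, hb⟩ | h)
      · left; simp at hb; simp [hb]
      · right; exact h
    · rintro (h | h)
      · left; simp at h; simp [h]
      · right; exact h

theorem pieces_ne_nil (v : List Char) (hdd : noDD v = true) (hl : v.getLast? ≠ some '_') :
    (∀ q ∈ (splitC '_' v).2, q ≠ []) ∧
    (v ≠ [] → v.head? ≠ some '_' → (splitC '_' v).1 ≠ []) := by
  fun_induction noDD v with
  | case1 => simp [splitC]
  | case2 a =>
    by_cases ha : a = '_'
    · subst ha; simp at hl
    · simp [splitC_cons, ha, splitC]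
  | case3 a b t ih =>
    simp only [noDD, Bool.and_eq_true, Bool.not_eq_eq_eq_not, Bool.not_true,
      Bool.and_eq_false_iff] at hdd
    obtain ⟨hab, hdd'⟩ := hdd
    rw [List.getLast?_cons_cons] at hl
    obtain ⟨ih1, ih2⟩ := ih hdd' hl
    by_cases ha : a = '_'
    · subst ha
      have hb : b ≠ '_' := by
        rcases hab with h | h
        · simp at h
        · simp at h; exact h
      rw [splitC_cons, if_pos rfl]
      refine ⟨?_, by intro _ h; simp at h⟩
      intro q hq
      simp only [List.mem_cons] at hq
      rcases hq with rfl | hq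
      · exact ih2 (by simp) (by simp [hb])
      · exact ih1 q hq
    · rw [splitC_cons, if_neg ha]
      exact ⟨ih1, fun _ _ => by simp⟩

theorem getLast?_cons_of_ne_nil' (a : Char) (l : List Char) (h : l ≠ []) :
    (a :: l).getLast? = l.getLast? := by
  cases l with
  | nil => simp at h
  | cons b t => rw [List.getLast?_cons_cons]

theorem repDD_pieces (v : List Char) :
    (splitC '_' (repDD v)).1 = (splitC '_' v).1 ∧
    filterNE (splitC '_' (repDD v)).2 = filterNE (splitC '_' v).2 := by
  fun_induction repDD v with
  | case1 => exact ⟨rfl, rfl⟩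
  | case2 a => exact ⟨rfl, rfl⟩
  | case3 a b t hab ih =>
    obtain ⟨rfl, rfl⟩ : a = '_' ∧ b = '_' := hab
    obtain ⟨ih1, ih2⟩ := ih
    refine ⟨by rw [splitC_cons, if_pos rfl, splitC_cons, if_pos rfl], ?_⟩
    rw [splitC_cons, if_pos rfl, splitC_cons, if_pos rfl, splitC_cons, if_pos rfl]
    simp only [filterNE_cons, ih1, ih2]
    simp
  | case4 a b t hab ih =>
    obtain ⟨ih1, ih2⟩ := ih
    by_cases ha : a = '_'
    · subst ha
      rw [splitC_cons, if_pos rfl, splitC_cons, if_pos rfl]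
      exact ⟨rfl, by simp only [filterNE_cons, ih1, ih2]⟩
    · rw [splitC_cons, if_neg ha, splitC_cons, if_neg ha]
      exact ⟨by rw [ih1], ih2⟩

theorem repDD_head? (v : List Char) : (repDD v).head? = v.head? := by
  fun_induction repDD v with
  | case1 => rfl
  | case2 a => rfl
  | case3 a b t hab ih => obtain ⟨rfl, rfl⟩ : a = '_' ∧ b = '_' := hab; rfl
  | case4 a b t hab ih => rfl

theorem repDD_getLast? (v : List Char) (h : v.getLast? ≠ some '_') :
    (repDD v).getLast? ≠ some '_' := by
  fun_induction repDD v with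
  | case1 => simpa using h
  | case2 a => simpa using h
  | case3 a b t hab ih =>
    obtain ⟨rfl, rfl⟩ : a = '_' ∧ b = '_' := hab
    rw [List.getLast?_cons_cons] at h
    cases t with
    | nil => simp at h
    | cons d t' =>
      rw [List.getLast?_cons_cons] at h
      have h2 := ih h
      have hne : repDD (d :: t') ≠ [] := repDD_ne_nil _ (by simp)
      rwa [getLast?_cons_of_ne_nil' _ _ hne]
  | case4 a b t hab ih =>
    rw [List.getLast?_cons_cons] at h
    have h2 := ih h
    have hne : repDD (b :: t) ≠ [] := repDD_ne_nil _ (by simp)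
    rwa [getLast?_cons_of_ne_nil' _ _ hne]

theorem inter_cons2 (s a : List Char) (l : List (List Char)) (b : List Char) :
    List.intercalate s (a :: b :: l) = a ++ s ++ List.intercalate s (b :: l) := by
  simp [List.intercalate, List.intersperse]

theorem splitC_cons_self (x : Char) (t : List Char) :
    splitC x (x :: t) = ([], (splitC x t).1 :: (splitC x t).2) := by
  rw [splitC_cons, if_pos rfl]

theorem joinU (v : List Char) : List.intercalate ['_'] (piecesL v) = v := by
  induction v with
  | nil => simp [piecesL, splitC, List.intercalate]
  | cons c t ih =>
    by_cases hc : c = '_'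
    · subst hc
      rw [piecesL, splitC_cons_self, inter_cons2]
      simpa [piecesL] using ih
    · rw [piecesL, splitC_cons, if_neg hc]
      cases h2 : (splitC '_' t).2 with
      | nil =>
        rw [piecesL, h2] at ih
        simp only [List.intercalate] at ih ⊢
        simp at ih ⊢
        simp [ih]
      | cons p ps =>
        rw [piecesL, h2] at ih
        show ['_'].intercalate ((c :: (splitC '_' t).1) :: p :: ps) = c :: t
        rw [inter_cons2] at ih ⊢
        simpa using congrArg (c :: ·) ih

theorem dropL (u : List Char) :
    filterNE (piecesL (List.dropWhile (fun c => c == '_') u)) = filterNE (piecesL u) := by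
  induction u with
  | nil => rfl
  | cons c t ih =>
    by_cases hc : c = '_'
    · subst hc
      rw [List.dropWhile_cons_of_pos (by simp), ih,
        show piecesL ('_'::t) = [] :: (splitC '_' t).1 :: (splitC '_' t).2 from by
          rw [piecesL, splitC_cons_self],
        filterNE_cons, if_pos rfl, piecesL]
    · rw [List.dropWhile_cons_of_neg (by simp [hc])]

theorem snocU (v : List Char) :
    (splitC '_' (v ++ ['_'])).1 = (splitC '_' v).1 ∧
    filterNE (splitC '_' (v ++ ['_'])).2 = filterNE (splitC '_' v).2 := by
  induction v with
  | nil => simp [splitC_cons_self, splitC, filterNE]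
  | cons c t ih =>
    obtain ⟨ih1, ih2⟩ := ih
    by_cases hc : c = '_'
    · subst hc
      rw [List.cons_append, splitC_cons_self, splitC_cons_self]
      exact ⟨rfl, by simp only [filterNE_cons, ih1, ih2]⟩
    · rw [List.cons_append, splitC_cons, if_neg hc, splitC_cons, if_neg hc]
      exact ⟨by rw [ih1], ih2⟩

theorem snocNE (v : List Char) :
    filterNE (piecesL (v ++ ['_'])) = filterNE (piecesL v) := by
  obtain ⟨h1, h2⟩ := snocU v
  rw [piecesL, piecesL]
  simp only [filterNE_cons, h1, h2]

theorem padR (pad : List Char) (hpad : ∀ c ∈ pad, c = '_') : ∀ v : List Char,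
    filterNE (piecesL (v ++ pad)) = filterNE (piecesL v) := by
  induction pad with
  | nil => intro v; rw [List.append_nil]
  | cons c pad' ih =>
    intro v
    have hc : c = '_' := hpad c (by simp)
    subst hc
    rw [List.append_cons, ih (fun d hd => hpad d (by simp [hd])) (v ++ ['_']), snocNE]

theorem strip_pieces (u : List Char) :
    filterNE (piecesL (PySem.Chars.stripChars u ['_'])) = filterNE (piecesL u) := by
  have hp : (fun c => List.contains ['_'] c) = (fun c : Char => c == '_') := by
    funext c; by_cases h : c = '_' <;> simp [h]
  rw [PySem.Chars.stripChars]
  simp only [hp]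
  set q := fun c : Char => c == '_' with hq
  set w := List.dropWhile q u with hw
  have hdec : w = (List.dropWhile q w.reverse).reverse ++ (List.takeWhile q w.reverse).reverse := by
    conv_lhs => rw [← List.reverse_reverse w, ← List.takeWhile_append_dropWhile (p := q) (l := w.reverse)]
    rw [List.reverse_append]
  have hpad : ∀ c ∈ (List.takeWhile q w.reverse).reverse, c = '_' := by
    intro c hc
    rw [List.mem_reverse] at hc
    have := List.mem_takeWhile_imp hc
    simpa [hq] using this
  calc filterNE (piecesL (List.dropWhile q w.reverse).reverse)
      = filterNE (piecesL ((List.dropWhile q w.reverse).reverse ++ (List.takeWhile q w.reverse).reverse)) := (padR _ hpad _).symm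
    _ = filterNE (piecesL w) := by rw [← hdec]
    _ = filterNE (piecesL u) := dropL u

theorem head?_dropWhile_not (q : Char → Bool) (l : List Char) (c : Char)
    (h : (List.dropWhile q l).head? = some c) : q c = false := by
  induction l with
  | nil => simp at h
  | cons a t ih =>
    by_cases hqa : q a = true
    · rw [List.dropWhile_cons_of_pos hqa] at h
      exact ih h
    · rw [List.dropWhile_cons_of_neg hqa] at h
      simp only [List.head?_cons, Option.some.injEq] at h
      subst h
      simpa using hqa

theorem strip_head (u : List Char) :
    (PySem.Chars.stripChars u ['_']).head? ≠ some '_' := by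
  have hp : (fun c => List.contains ['_'] c) = (fun c : Char => c == '_') := by
    funext c; by_cases h : c = '_' <;> simp [h]
  rw [PySem.Chars.stripChars]
  simp only [hp]
  set q := fun c : Char => c == '_' with hq
  set w := List.dropWhile q u with hw
  rw [List.head?_reverse]
  cases hr : (List.dropWhile q w.reverse).getLast? with
  | none => simp
  | some c =>
    have hne : List.dropWhile q w.reverse ≠ [] := by
      intro hcon; rw [hcon] at hr; simp at hr
    have h1 : (List.dropWhile q w.reverse).getLast? = w.reverse.getLast? := by
      conv_rhs => rw [← List.takeWhile_append_dropWhile (p := q) (l := w.reverse)]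
      rw [List.getLast?_append_of_ne_nil _ hne]
    rw [hr] at h1
    have h2 : w.head? = some c := by rw [← List.getLast?_reverse, ← h1]
    have h3 : q c = false := head?_dropWhile_not q u c (by rw [← hw]; exact h2)
    simp only [hq] at h3
    intro hcon
    simp only [Option.some.injEq] at hcon
    rw [hcon] at h3
    simp at h3

theorem strip_last (u : List Char) :
    (PySem.Chars.stripChars u ['_']).getLast? ≠ some '_' := by
  have hp : (fun c => List.contains ['_'] c) = (fun c : Char => c == '_') := by
    funext c; by_cases h : c = '_' <;> simp [h]
  rw [PySem.Chars.stripChars]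
  simp only [hp]
  set q := fun c : Char => c == '_' with hq
  rw [List.getLast?_reverse]
  cases hr : (List.dropWhile q (List.dropWhile q u).reverse).head? with
  | none => simp
  | some c =>
    have h3 : q c = false := head?_dropWhile_not q (List.dropWhile q u).reverse c hr
    simp only [hq] at h3
    intro hcon
    simp only [Option.some.injEq] at hcon
    rw [hcon] at h3
    simp at h3

theorem wc_norm : ∀ (n : Nat) (v : List Char), v.length ≤ n → v.head? ≠ some '_' →
    v.getLast? ≠ some '_' →
    whileCollapse v = List.intercalate ['_'] (filterNE (piecesL v)) := by
  intro n
  induction n with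
  | zero =>
    intro v hlen _ _
    have hv : v = [] := by cases v <;> simp_all
    subst hv
    rw [whileCollapse, dif_neg (by decide)]
    simp [piecesL, splitC, filterNE, List.intercalate]
  | succ n ih =>
    intro v hlen hh hl
    rw [whileCollapse]
    by_cases h : PySem.Chars.isIn ['_','_'] v = true
    · rw [dif_pos h, replace_dd_eq]
      have hinf := (PySem.Chars.isIn_iff_infix _ _).mp h
      have hlt := repDD_length_lt v hinf
      rw [ih (repDD v) (by omega) (by rw [repDD_head?]; exact hh) (repDD_getLast? v hl)]
      obtain ⟨h1, h2⟩ := repDD_pieces v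
      rw [piecesL, piecesL]
      simp only [filterNE_cons, h1, h2]
    · rw [dif_neg h]
      have hninf : ¬ ['_','_'] <:+: v := fun hc =>
        h ((PySem.Chars.isIn_iff_infix _ _).mpr hc)
      have hndd : noDD v = true := by
        rcases hb : noDD v with _ | _
        · exact absurd ((dd_infix_iff v).mpr hb) hninf
        · rfl
      cases v with
      | nil => simp [piecesL, splitC, filterNE, List.intercalate]
      | cons c t =>
        obtain ⟨hne2, hne1⟩ := pieces_ne_nil (c::t) hndd hl
        have hfil : filterNE (piecesL (c::t)) = piecesL (c::t) := by
          rw [piecesL, filterNE]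
          apply List.filter_eq_self.mpr
          intro a ha
          simp only [List.mem_cons] at ha
          rcases ha with rfl | ha
          · simpa using hne1 (by simp) hh
          · simpa using hne2 a ha
        rw [hfil, joinU]

theorem a_norm (u : List Char) :
    whileCollapse (PySem.Chars.stripChars u ['_'])
      = List.intercalate ['_'] (filterNE (piecesL u)) := by
  rw [wc_norm (PySem.Chars.stripChars u ['_']).length _ le_rfl (strip_head u) (strip_last u),
    strip_pieces u]

theorem main_eq (label : String) :
    slugify_field_name_py label = slugify_field_name_py_alt label := by
  simp only [slugify_field_name_py, slugify_field_name_py_alt]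
  rw [foldl_cleaned, List.nil_append]
  rw [a_norm]
  rw [replace_single_eq, replace_single_eq, List.map_map]
  rw [show ((fun c => if c = '_' then ' ' else c) ∘ (fun c => if c = '-' then ' ' else c)) = gSep
    from rfl]
  rw [splitOn_single_eq, PySem.Chars.join]
  obtain ⟨p1, p2⟩ := pw (PySem.Chars.lower (PySem.Chars.strip label.toList))
  rw [List.map_cons, ← p1, ← p2]
  rfl

-- ===== VERDICT (by name: the statement is the Claim_ definition above) =====
theorem slugify_field_name_py_spec : Claim_equal_slugify_field_name_py := by
  intro label _
  unfold Spec_slugify_field_name_py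
  exact main_eq label
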